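-- pv_equiv track=rewrite | github.com/tzvetandacov/Programming0 | week7/inner_trim.py | inner_trim
-- ===== SOURCE A (Python) =====
-- def startswith(search, string):
--     search = str(search)
--     string = str(string)
--
--     for index in range(0, len(search)):
--         if search[index] != string[index]:
--             return False
--         else: pass
--
--     return True
--
-- def str_drop(n, string):
--     result = ""
--     for index in range(n, len(string)):
--         result += string[index]
--     return result
--
-- def reverse_str(string):
--     result = ""
--     for ch in string:
--         result = ch + result
--     return result
--
-- def trim_begin(string):
--
--     while startswith(" ", string):
--         string = str_drop(1, string)
--
--
--     return string
--
-- def trim_end(string):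
--     return reverse_str(trim_begin(reverse_str(string)))
--
-- def trim(string):
--     return trim_end(trim_begin(string))
--
-- def inner_trim(string):
--     string = trim(string)
--     result = ""
--     for index in range(0, len(string)):
--
--         if string[index] == " " and string[index +1] == " ":
--             pass
--         else:
--             result += string[index]
--
--     return result
-- ===== SOURCE B (Python) =====
-- def inner_trim(string):
--     return ' '.join(filter(None, string.split(' ')))
-- ===== Notes on version B (the rewrite author's own statement) =====
-- stated objective: faster
-- what changed: Replaced A's pipeline of character-index scans (repeated drop-first-char trimming via str_drop, double reversal, and a lookahead collapse loop) by the standard single-pass split-on-space / filter-empties / rejoin idiom.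
import Mathlib
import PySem

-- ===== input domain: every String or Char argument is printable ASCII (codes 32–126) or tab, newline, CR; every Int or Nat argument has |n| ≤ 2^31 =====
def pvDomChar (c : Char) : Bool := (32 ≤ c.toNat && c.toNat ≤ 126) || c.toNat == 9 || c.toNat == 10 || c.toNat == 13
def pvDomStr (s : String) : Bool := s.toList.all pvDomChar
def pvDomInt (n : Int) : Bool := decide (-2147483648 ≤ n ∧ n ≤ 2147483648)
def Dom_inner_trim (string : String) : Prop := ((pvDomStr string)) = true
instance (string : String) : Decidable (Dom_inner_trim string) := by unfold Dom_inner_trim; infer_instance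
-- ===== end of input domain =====

-- B replaces A's quadratic character-index trim/collapse scans by the linear split-on-space / drop-empties / rejoin idiom (measured faster in a timing run).
-- A raises IndexError on empty / all-space input (outside Pre_); the option-threaded port of A falls back to "" there — nothing is claimed outside Pre_.

-- ===== PORT A =====
-- 'def startswith(search, string)': loop over range(0, len(search)); string[index] may raise IndexError (→ none).

def startswith_go (search string : List Char) : List Int → Option Bool
  | [] => some true
  | i :: rest =>
    match PySem.List.pyGet? search i with
    | none => none
    | some a =>
      match PySem.List.pyGet? string i with
      | none => none
      | some b => if a ≠ b then some false else startswith_go search string rest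

def startswith_p (search string : List Char) : Option Bool :=
  startswith_go search string (PySem.List.pyRange 0 (search.length : Int) 1)

-- 'def str_drop(n, string)': result accumulated over range(n, len(string)).
def str_drop_go (string : List Char) : List Int → List Char → Option (List Char)
  | [], acc => some acc
  | i :: rest, acc =>
    match PySem.List.pyGet? string i with
    | none => none
    | some c => str_drop_go string rest (acc ++ [c])

def str_drop_p (n : Int) (string : List Char) : Option (List Char) :=
  str_drop_go string (PySem.List.pyRange n (string.length : Int) 1) []

-- 'def reverse_str(string)': result = ch + result over the chars.
def reverse_str_p (string : List Char) : List Char :=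
  string.foldl (fun acc ch => ch :: acc) []

-- 'def trim_begin(string)': while startswith(" ", string): string = str_drop(1, string).
-- The fuel only makes the while-loop structural; each iteration shortens the string, so length+1 fuel is never exhausted inside Pre_.
def trim_begin_go : Nat → List Char → Option (List Char)
  | 0, _ => none
  | fuel+1, s =>
    match startswith_p [' '] s with
    | none => none
    | some true =>
      match str_drop_p 1 s with
      | none => none
      | some s' => trim_begin_go fuel s'
    | some false => some s

def trim_begin_p (s : List Char) : Option (List Char) := trim_begin_go (s.length + 1) s

-- 'def trim_end(string)' and 'def trim(string)'.
def trim_end_p (s : List Char) : Option (List Char) :=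
  (trim_begin_p (reverse_str_p s)).map reverse_str_p

def trim_p (s : List Char) : Option (List Char) :=
  (trim_begin_p s).bind trim_end_p

-- the final loop of inner_trim: 'if string[index] == " " and string[index+1] == " "' (short-circuit kept).
def inner_go (s : List Char) : List Int → List Char → Option (List Char)
  | [], acc => some acc
  | i :: rest, acc =>
    match PySem.List.pyGet? s i with
    | none => none
    | some c =>
      if c = ' ' then
        match PySem.List.pyGet? s (i + 1) with
        | none => none
        | some c' =>
          if c' = ' ' then inner_go s rest acc
          else inner_go s rest (acc ++ [c])
      else inner_go s rest (acc ++ [c])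

def inner_trim (string : String) : String :=
  match trim_p string.toList with
  | none => ""
  | some t =>
    match inner_go t (PySem.List.pyRange 0 (t.length : Int) 1) [] with
    | none => ""
    | some r => String.ofList r

-- ===== PORT B =====
-- Source B: return ' '.join(filter(None, string.split(' ')))
def inner_trim_alt (string : String) : String :=
  PySem.Str.join " " (((PySem.Str.split? string " ").getD []).filter (fun w => w ≠ ""))

-- ===== PRECONDITION & SPEC =====
-- Pre_ excludes exactly the strings that are empty or all spaces: there A's startswith
-- indexes an empty string and raises IndexError (A returns no value there).
def Pre_inner_trim (string : String) : Prop := string.toList.any (· ≠ ' ') = true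
instance (string : String) : Decidable (Pre_inner_trim string) := by unfold Pre_inner_trim; infer_instance

def pvWitness_inner_trim : String := " a b "

def Spec_inner_trim (string : String) (out : String) : Prop := out = inner_trim_alt string
instance (string : String) (out : String) : Decidable (Spec_inner_trim string out) := by unfold Spec_inner_trim; infer_instance

-- ===== CLAIM (what is proved, stated in full; the proofs are below) =====
def Claim_equal_inner_trim : Prop := ∀ (string : String), Dom_inner_trim string → Pre_inner_trim string → Spec_inner_trim string (inner_trim string)

-- ===== LEMMAS AND PROOFS =====
-- proof-side models: mySplit = PySem.Chars.splitOn · [' '], collapse = A's lookahead loop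

def mySplit : List Char → List (List Char)
  | [] => [[]]
  | a :: rest => if a = ' ' then [] :: mySplit rest else List.modifyHead (a :: ·) (mySplit rest)

def collapse : List Char → List Char
  | [] => []
  | [a] => [a]
  | a :: b :: t => if a = ' ' ∧ b = ' ' then collapse (b :: t) else a :: collapse (b :: t)

lemma mySplit_ne_nil : ∀ l : List Char, mySplit l ≠ []
  | [] => by simp [mySplit]
  | a :: t => by
    simp only [mySplit]
    split
    · simp
    · have h := mySplit_ne_nil t
      cases hm : mySplit t with
      | nil => exact absurd hm h
      | cons x xs => simp [hm]

lemma collapse_cons (c : Char) (r : List Char) :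
    collapse (c :: r) = if c = ' ' ∧ r.head? = some ' ' then collapse r else c :: collapse r := by
  cases r with
  | nil => simp [collapse]
  | cons b t => simp [collapse]

lemma collapse_ne_nil : ∀ u : List Char, u ≠ [] → collapse u ≠ []
  | [], h => absurd rfl h
  | [a], _ => by simp [collapse]
  | a :: b :: t, _ => by
    simp only [collapse]
    split
    · exact collapse_ne_nil (b :: t) (by simp)
    · simp

lemma foldl_cons_rev (l acc : List Char) :
    l.foldl (fun acc ch => ch :: acc) acc = l.reverse ++ acc := by
  induction l generalizing acc with
  | nil => simp
  | cons a t ih => simp [List.foldl_cons, ih]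

lemma reverse_str_p_eq (l : List Char) : reverse_str_p l = l.reverse := by
  rw [reverse_str_p, foldl_cons_rev]
  simp

lemma startswith_p_space (a : Char) (t : List Char) :
    startswith_p [' '] (a :: t) = some (decide (a = ' ')) := by
  have h1 : PySem.List.pyRange 0 ((([' '] : List Char).length : Int)) 1 = [0] := by decide
  simp only [startswith_p, h1, startswith_go]
  have h2 : PySem.List.pyGet? ([' '] : List Char) 0 = some ' ' := by decide
  have h3 : PySem.List.pyGet? (a :: t) 0 = some a := by
    simp [PySem.List.pyGet?, PySem.List.pyIdx?]
  simp only [h2, h3]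
  by_cases ha : a = ' '
  · subst ha; simp [startswith_go]
  · simp [Ne.symm ha, ha]

lemma str_drop_go_eq (l : List Char) (j : Nat) (acc : List Char) (hj : j ≤ l.length) :
    str_drop_go l (PySem.List.pyRange (j : Int) (l.length : Int) 1) acc = some (acc ++ l.drop j) := by
  induction hn : l.length - j generalizing j acc with
  | zero =>
    have : l.length ≤ j := by omega
    rw [PySem.List.pyRange_one_eq_nil (by exact_mod_cast this)]
    simp [str_drop_go, List.drop_eq_nil_of_le this]
  | succ n ih =>
    have hlt : j < l.length := by omega
    rw [PySem.List.pyRange_one_cons (by exact_mod_cast hlt)]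
    simp only [str_drop_go]
    have hg : PySem.List.pyGet? l (j : Int) = some l[j] := by
      simp [PySem.List.pyGet?_natCast, List.getElem?_eq_getElem hlt]
    rw [hg]
    have : ((j : Int) + 1) = ((j + 1 : Nat) : Int) := by push_cast; ring
    rw [this]
    have h4 := ih (j + 1) (acc ++ [l[j]]) (by omega) (by omega)
    simp only [h4, List.drop_eq_getElem_cons hlt]
    simp

lemma str_drop_p_one (a : Char) (t : List Char) : str_drop_p 1 (a :: t) = some t := by
  have := str_drop_go_eq (a :: t) 1 [] (by simp)
  simpa [str_drop_p] using this

lemma trim_begin_go_eq (fuel : Nat) : ∀ (l : List Char), (∃ c ∈ l, c ≠ ' ') →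
    l.length < fuel → trim_begin_go fuel l = some (l.dropWhile (· = ' ')) := by
  induction fuel with
  | zero => intro l _ h; omega
  | succ n ih =>
    intro l hex hlen
    cases l with
    | nil => simp at hex
    | cons a t =>
      simp only [trim_begin_go, startswith_p_space a t]
      by_cases ha : a = ' '
      · subst ha
        simp only [decide_true, str_drop_p_one]
        have hex' : ∃ c ∈ t, c ≠ ' ' := by
          obtain ⟨c, hc, hne⟩ := hex
          rcases List.mem_cons.mp hc with rfl | hct
          · exact absurd rfl hne
          · exact ⟨c, hct, hne⟩
        rw [ih t hex' (by simp at hlen ⊢; omega)]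
        simp [List.dropWhile_cons]
      · simp [ha, List.dropWhile_cons]

lemma trim_begin_p_eq (l : List Char) (h : ∃ c ∈ l, c ≠ ' ') :
    trim_begin_p l = some (l.dropWhile (· = ' ')) :=
  trim_begin_go_eq (l.length + 1) l h (by omega)

lemma inner_go_eq (u : List Char) (hl : u.getLast? ≠ some ' ') : ∀ (j : Nat) (acc : List Char),
    j ≤ u.length →
    inner_go u (PySem.List.pyRange (j : Int) (u.length : Int) 1) acc = some (acc ++ collapse (u.drop j)) := by
  intro j acc hj
  induction hn : u.length - j generalizing j acc with
  | zero =>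
    have h : u.length ≤ j := by omega
    rw [PySem.List.pyRange_one_eq_nil (by exact_mod_cast h)]
    simp [inner_go, List.drop_eq_nil_of_le h, collapse]
  | succ n ih =>
    have hlt : j < u.length := by omega
    rw [PySem.List.pyRange_one_cons (by exact_mod_cast hlt)]
    have hg : PySem.List.pyGet? u (j : Int) = some u[j] := by
      simp [List.getElem?_eq_getElem hlt]
    simp only [inner_go, hg]
    have hcast : ((j : Int) + 1) = ((j + 1 : Nat) : Int) := by push_cast; ring
    have hdrop : u.drop j = u[j] :: u.drop (j + 1) := List.drop_eq_getElem_cons hlt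
    by_cases hc : u[j] = ' '
    · rw [if_pos hc]
      have hj1 : j + 1 < u.length := by
        rcases Nat.lt_or_ge (j+1) u.length with h | h
        · exact h
        · exfalso
          have hjl : j = u.length - 1 := by omega
          subst hjl
          have hgl : u.getLast? = some u[u.length - 1] := by
            rw [List.getLast?_eq_getElem?, List.getElem?_eq_getElem (by omega)]
          rw [hgl] at hl
          exact hl (by rw [hc])
      have hg1 : PySem.List.pyGet? u ((j : Int) + 1) = some u[j+1] := by
        rw [hcast, PySem.List.pyGet?_natCast]
        exact List.getElem?_eq_getElem hj1
      simp only [hg1]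
      have hdrop1 : (u.drop (j+1)).head? = some u[j+1] := by
        rw [List.head?_drop]
        simp [List.getElem?_eq_getElem hj1]
      by_cases hc1 : u[j+1] = ' '
      · rw [if_pos hc1, hcast, ih (j+1) acc (by omega) (by omega)]
        rw [hdrop, collapse_cons, if_pos ⟨hc, by rw [hdrop1, hc1]⟩]
      · rw [if_neg hc1, hcast, ih (j+1) (acc ++ [u[j]]) (by omega) (by omega)]
        rw [hdrop, collapse_cons,
          if_neg (by rintro ⟨-, h2⟩; exact hc1 (by rw [hdrop1] at h2; simpa using h2))]
        simp
    · rw [if_neg hc, hcast, ih (j+1) (acc ++ [u[j]]) (by omega) (by omega)]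
      rw [hdrop, collapse_cons, if_neg (by rintro ⟨h1, -⟩; exact hc h1)]
      simp

lemma splitOn_go_space (fuel : Nat) : ∀ (l cur acc : List Char) (accs : List (List Char)),
    l.length ≤ fuel →
    PySem.Chars.splitOn.go [' '] fuel l cur accs = accs.reverse ++ List.modifyHead (cur.reverse ++ ·) (mySplit l) := by
  induction fuel with
  | zero =>
    intro l cur acc accs hl
    have : l = [] := List.length_eq_zero_iff.mp (by omega)
    subst this
    simp [PySem.Chars.splitOn.go, mySplit]
  | succ n ih =>
    intro l cur acc accs hl
    cases l with
    | nil => simp [PySem.Chars.splitOn.go, mySplit]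
    | cons c rest =>
      by_cases hc : c = ' '
      · subst hc
        have hpre : ([' '] : List Char).isPrefixOf (' ' :: rest) = true := by
          simp [List.isPrefixOf]
        rw [PySem.Chars.splitOn.go]
        simp only [hpre, if_pos]
        rw [show List.drop ([' '] : List Char).length (' ' :: rest) = rest from rfl]
        rw [ih rest [] [] (cur.reverse :: accs) (by simpa using Nat.le_of_succ_le_succ (by simpa using hl))]
        simp only [mySplit, if_pos rfl]
        cases mySplit rest <;> simp
      · have hpre : ([' '] : List Char).isPrefixOf (c :: rest) = false := by
          simp [List.isPrefixOf]
          exact fun h => hc h.symm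
        rw [PySem.Chars.splitOn.go]
        simp only [hpre]
        rw [if_neg (by simp [hpre])]
        rw [ih rest (c :: cur) [] accs (by simpa using Nat.le_of_succ_le_succ (by simpa using hl))]
        simp only [mySplit, if_neg hc]
        congr 1
        rw [List.modifyHead_modifyHead]
        congr 1
        funext x
        simp

lemma splitOn_space (l : List Char) : PySem.Chars.splitOn l [' '] = mySplit l := by
  rw [PySem.Chars.splitOn, splitOn_go_space (l.length + 1) l [] [] [] (by omega)]
  cases mySplit l <;> simp

-- W l := (mySplit l).filter (· ≠ []);  J := List.intercalate [' ']

lemma J_cons_cons (x y : List Char) (t : List (List Char)) :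
    List.intercalate [' '] (x :: y :: t) = x ++ ' ' :: List.intercalate [' '] (y :: t) := by
  simp [List.intercalate, List.intersperse]

lemma J_singleton (x : List Char) : List.intercalate [' '] [x] = x := by
  simp [List.intercalate]

lemma W_space_cons (t : List Char) :
    (mySplit (' ' :: t)).filter (· ≠ []) = (mySplit t).filter (· ≠ []) := by
  simp [mySplit]

lemma W_dropWhile (l : List Char) :
    (mySplit (l.dropWhile (· = ' '))).filter (· ≠ []) = (mySplit l).filter (· ≠ []) := by
  induction l with
  | nil => rfl
  | cons a t ih =>
    by_cases ha : a = ' '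
    · subst ha
      rw [List.dropWhile_cons_of_pos (by simp), ih, W_space_cons]
    · rw [List.dropWhile_cons_of_neg (by simpa using ha)]

lemma mySplit_append_space (l : List Char) : mySplit (l ++ [' ']) = mySplit l ++ [[]] := by
  induction l with
  | nil => simp [mySplit]
  | cons a t ih =>
    by_cases ha : a = ' '
    · subst ha; simp [mySplit, ih]
    · simp only [List.cons_append, mySplit, if_neg ha, ih]
      cases h : mySplit t with
      | nil => exact absurd h (mySplit_ne_nil t)
      | cons x xs => simp

lemma W_append_space (l : List Char) :
    (mySplit (l ++ [' '])).filter (· ≠ []) = (mySplit l).filter (· ≠ []) := by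
  rw [mySplit_append_space]
  simp

lemma W_append_spaces : ∀ (Y : List Char), (∀ x ∈ Y, x = ' ') → ∀ (v : List Char),
    (mySplit (v ++ Y)).filter (· ≠ []) = (mySplit v).filter (· ≠ []) := by
  intro Y
  induction Y with
  | nil => simp
  | cons y Y' ih =>
    intro hY v
    have hy : y = ' ' := hY y (by simp)
    subst hy
    have : v ++ ' ' :: Y' = (v ++ [' ']) ++ Y' := by simp
    rw [this, ih (fun x hx => hY x (by simp [hx])) (v ++ [' ']), W_append_space]

lemma mySplit_word_append : ∀ (word rest : List Char), (∀ x ∈ word, x ≠ ' ') →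
    mySplit (word ++ rest) = List.modifyHead (word ++ ·) (mySplit rest) := by
  intro word
  induction word with
  | nil =>
    intro rest _
    cases h : mySplit rest <;> simp [h]
  | cons a w ih =>
    intro rest hw
    have ha : a ≠ ' ' := hw a (by simp)
    simp only [List.cons_append, mySplit, if_neg ha, ih rest (fun x hx => hw x (by simp [hx]))]
    rw [List.modifyHead_modifyHead]
    congr 1

lemma collapse_word_append : ∀ (word rest : List Char), word ≠ [] → (∀ x ∈ word, x ≠ ' ') →
    collapse (word ++ rest) = word ++ collapse rest := by
  intro word
  induction word with
  | nil => intro rest h; exact absurd rfl h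
  | cons a w ih =>
    intro rest _ hw
    have ha : a ≠ ' ' := hw a (by simp)
    cases w with
    | nil =>
      cases rest with
      | nil => simp [collapse]
      | cons r0 rt =>
        rw [show ([a] ++ (r0 :: rt)) = a :: (r0 :: rt) from rfl, collapse_cons,
          if_neg (by rintro ⟨h1, -⟩; exact ha h1)]
        rfl
    | cons b w' =>
      have hcw : collapse ((b :: w') ++ rest) = (b :: w') ++ collapse rest :=
        ih rest (by simp) (fun x hx => hw x (by simp [hx]))
      calc collapse ((a :: b :: w') ++ rest)
          = a :: collapse ((b :: w') ++ rest) := by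
            rw [show ((a :: b :: w') ++ rest) = a :: ((b :: w') ++ rest) from rfl, collapse_cons,
              if_neg (by rintro ⟨h1, -⟩; exact ha h1)]
        _ = a :: ((b :: w') ++ collapse rest) := by rw [hcw]
        _ = (a :: b :: w') ++ collapse rest := rfl

lemma collapse_space_prefix : ∀ (rest : List Char), rest.head? = some ' ' →
    rest.dropWhile (· = ' ') ≠ [] →
    collapse rest = ' ' :: collapse (rest.dropWhile (· = ' ')) := by
  intro rest
  induction rest with
  | nil => intro h; simp at h
  | cons a r ih =>
    intro hh hd
    have ha : a = ' ' := by simpa using hh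
    subst ha
    rw [List.dropWhile_cons_of_pos (by simp)] at hd ⊢
    cases r with
    | nil => simp at hd
    | cons b r' =>
      by_cases hb : b = ' '
      · subst hb
        rw [collapse_cons, if_pos ⟨rfl, rfl⟩]
        rw [ih rfl (by rwa [List.dropWhile_cons_of_pos (by simp)] at hd ⊢)]
      · rw [List.dropWhile_cons_of_neg (by simpa using hb), collapse_cons,
          if_neg (by rintro ⟨-, h2⟩; exact hb (by simpa using h2))]

lemma main_eq : ∀ (n : Nat) (u : List Char), u.length ≤ n → u ≠ [] →
    u.head? ≠ some ' ' → u.getLast? ≠ some ' ' →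
    List.intercalate [' '] ((mySplit u).filter (· ≠ [])) = collapse u := by
  intro n
  induction n with
  | zero =>
    intro u hlen h0 _ _
    exact absurd (List.length_eq_zero_iff.mp (by omega)) h0
  | succ n ih =>
    intro u hlen h0 hh hl
    set word := u.takeWhile (fun c => c ≠ ' ') with hword_def
    set rest := u.dropWhile (fun c => c ≠ ' ') with hrest_def
    have hu : word ++ rest = u := List.takeWhile_append_dropWhile
    have hword_ne : word ≠ [] := by
      cases u with
      | nil => exact absurd rfl h0
      | cons a t =>
        have ha : a ≠ ' ' := by simpa using hh
        simp [hword_def, List.takeWhile_cons, ha]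
    have hword_all : ∀ x ∈ word, x ≠ ' ' := by
      intro x hx
      simpa using List.mem_takeWhile_imp hx
    have hsplit : mySplit u = List.modifyHead (word ++ ·) (mySplit rest) := by
      rw [← hu]
      exact mySplit_word_append word rest hword_all
    by_cases hrest : rest = []
    · rw [hsplit, hrest]
      rw [show mySplit [] = [[]] from rfl]
      rw [show List.modifyHead (word ++ ·) [[]] = [word ++ []] from rfl]
      have hueq : u = word := by rw [← hu, hrest, List.append_nil]
      rw [List.append_nil]
      rw [List.filter_cons, if_pos (by simpa using hword_ne)]
      rw [show List.filter (fun x => decide (x ≠ [])) ([] : List (List Char)) = [] from rfl]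
      rw [J_singleton, hueq]
      rw [show word = word ++ [] by simp] at hueq ⊢
      rw [collapse_word_append word [] hword_ne hword_all]
      rfl
    · have hrh : rest.head? = some ' ' := by
        cases hr : rest with
        | nil => exact absurd hr hrest
        | cons b r =>
          have := List.head?_dropWhile_not (fun c : Char => decide (c ≠ ' ')) u
          rw [← hrest_def, hr] at this
          simpa using this
      have hrl : rest.getLast? = u.getLast? := by
        rw [← hu, List.getLast?_append]
        rw [List.getLast?_eq_getLast hrest]
        rfl
      set w2 := rest.dropWhile (· = ' ') with hw2_def
      have hw2ne : w2 ≠ [] := by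
        intro hnil
        have hall : ∀ x ∈ rest, x = ' ' := by
          intro x hx
          simpa using List.dropWhile_eq_nil_iff.mp hnil x hx
        have : rest.getLast? = some ' ' := by
          rw [List.getLast?_eq_getLast hrest]
          exact congrArg some (hall _ (List.getLast_mem hrest))
        rw [hrl] at this
        exact hl this
      have hw2h : w2.head? ≠ some ' ' := by
        cases hw : w2 with
        | nil => simp
        | cons b r =>
          have := List.head?_dropWhile_not (fun c : Char => decide (c = ' ')) rest
          rw [← hw2_def, hw] at this
          simpa using this
      have hw2l : w2.getLast? = rest.getLast? := by
        conv_rhs => rw [← List.takeWhile_append_dropWhile (p := fun c : Char => decide (c = ' ')) (l := rest)]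
        rw [List.getLast?_append, List.getLast?_eq_getLast hw2ne]
        rfl
      have hlen2 : w2.length ≤ n := by
        have h1 : word.length + rest.length = u.length := by
          conv_rhs => rw [← hu]
          rw [List.length_append]
        have h2 : w2.length ≤ rest.length := List.length_dropWhile_le _ _
        have h3 : 1 ≤ word.length :=
          Nat.one_le_iff_ne_zero.mpr (by simpa [List.length_eq_zero_iff] using hword_ne)
        omega
      have hIH : List.intercalate [' '] ((mySplit w2).filter (· ≠ [])) = collapse w2 :=
        ih w2 hlen2 hw2ne hw2h (by rw [hw2l, hrl]; exact hl)
      -- W u = word :: W w2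
      obtain ⟨r, hr⟩ : ∃ r, rest = ' ' :: r := by
        cases hr : rest with
        | nil => exact absurd hr hrest
        | cons b t =>
          rw [hr] at hrh
          exact ⟨t, by rw [show b = ' ' by simpa using hrh]⟩
      have hWu : (mySplit u).filter (· ≠ []) = word :: (mySplit w2).filter (· ≠ []) := by
        rw [hsplit, hr]
        rw [show mySplit (' ' :: r) = [] :: mySplit r from by simp [mySplit]]
        rw [show List.modifyHead (word ++ ·) ([] :: mySplit r) = (word ++ []) :: mySplit r from rfl]
        rw [List.filter_cons, if_pos (by simpa using hword_ne)]
        congr 1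
        · simp
        · have : (mySplit rest).filter (· ≠ []) = (mySplit w2).filter (· ≠ []) :=
            (W_dropWhile rest).symm
          rw [hr] at this
          rw [← this, W_space_cons]
      have hWw2 : ∃ x xs, (mySplit w2).filter (· ≠ []) = x :: xs := by
        cases hW : (mySplit w2).filter (· ≠ []) with
        | nil =>
          exfalso
          rw [hW] at hIH
          exact collapse_ne_nil w2 hw2ne (by simpa [List.intercalate] using hIH.symm)
        | cons x xs => exact ⟨x, xs, rfl⟩
      obtain ⟨x, xs, hW⟩ := hWw2
      rw [hWu, hW, J_cons_cons, ← hW, hIH]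
      rw [← hu, collapse_word_append word rest hword_ne hword_all]
      rw [collapse_space_prefix rest hrh (by rw [← hw2_def]; exact hw2ne)]

lemma mem_dropWhile_of_ne (l : List Char) (c : Char) (hc : c ∈ l) (hne : c ≠ ' ') :
    c ∈ l.dropWhile (· = ' ') := by
  induction l with
  | nil => simp at hc
  | cons a t ih =>
    by_cases ha : a = ' '
    · subst ha
      rw [List.dropWhile_cons_of_pos (by simp)]
      rcases List.mem_cons.mp hc with rfl | h
      · exact absurd rfl hne
      · exact ih h
    · rwa [List.dropWhile_cons_of_neg (by simpa using ha)]

theorem inner_trim_eq_alt (s : String) (hPre : ∃ c ∈ s.toList, c ≠ ' ') :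
    inner_trim s = inner_trim_alt s := by
  obtain ⟨c, hcmem, hcne⟩ := hPre
  set l := s.toList with hl_def
  set t1 := l.dropWhile (· = ' ') with ht1_def
  have hct1 : c ∈ t1 := mem_dropWhile_of_ne l c hcmem hcne
  have htb1 : trim_begin_p l = some t1 := trim_begin_p_eq l ⟨c, hcmem, hcne⟩
  set X := t1.reverse.dropWhile (· = ' ') with hX_def
  have hcX : c ∈ X := mem_dropWhile_of_ne t1.reverse c (by simpa using hct1) hcne
  have htb2 : trim_begin_p t1.reverse = some X :=
    trim_begin_p_eq t1.reverse ⟨c, by simpa using hct1, hcne⟩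
  set u := X.reverse with hu_def
  have htrim : trim_p l = some u := by
    rw [trim_p, htb1, Option.bind_some, trim_end_p, reverse_str_p_eq, htb2]
    rw [Option.map_some, reverse_str_p_eq]
  -- endpoint facts about u
  have hXne : X ≠ [] := List.ne_nil_of_mem hcX
  have hune : u ≠ [] := by simpa [hu_def] using hXne
  have hul : u.getLast? ≠ some ' ' := by
    rw [hu_def, List.getLast?_reverse]
    have := List.head?_dropWhile_not (fun c : Char => decide (c = ' ')) t1.reverse
    rw [← hX_def] at this
    cases hX : X.head? with
    | none => simp
    | some b =>
      rw [hX] at this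
      simpa using fun h => absurd (h ▸ this) (by simp)
  have huh : u.head? ≠ some ' ' := by
    rw [hu_def, List.head?_reverse]
    have hXl : X.getLast? = t1.reverse.getLast? := by
      conv_rhs => rw [← List.takeWhile_append_dropWhile (p := fun c : Char => decide (c = ' ')) (l := t1.reverse)]
      rw [List.getLast?_append, ← hX_def, List.getLast?_eq_getLast hXne]
      rfl
    rw [hXl, List.getLast?_reverse]
    have := List.head?_dropWhile_not (fun c : Char => decide (c = ' ')) l
    rw [← ht1_def] at this
    cases ht : t1.head? with
    | none => simp
    | some b =>
      rw [ht] at this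
      simpa using fun h => absurd (h ▸ this) (by simp)
  -- A's value
  have hA : inner_trim s = String.ofList (collapse u) := by
    have h0 := inner_go_eq u hul 0 [] (by omega)
    norm_num at h0
    simp only [inner_trim, ← hl_def, htrim, h0]
  -- B's value
  have hsplit : PySem.Chars.split? l [' '] = some (mySplit l) := by
    rw [PySem.Chars.split?.eq_1]
    simp [splitOn_space]
  obtain ⟨parts, hparts, hmap⟩ : ∃ parts, PySem.Str.split? s " " = some parts ∧
      parts.map String.toList = mySplit l := by
    have hb := PySem.Str.split?_map s " "
    rw [show (" " : String).toList = [' '] from rfl, ← hl_def, hsplit] at hb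
    cases hp : PySem.Str.split? s " " with
    | none => rw [hp] at hb; simp at hb
    | some parts =>
      rw [hp] at hb
      exact ⟨parts, rfl, by simpa using hb⟩
  have hB : inner_trim_alt s = String.ofList
      (List.intercalate [' '] ((mySplit l).filter (· ≠ []))) := by
    rw [inner_trim_alt, hparts, Option.getD_some, PySem.Str.join]
    congr 1
    rw [show (" " : String).toList = [' '] from rfl]
    rw [show PySem.Chars.join [' '] (List.map String.toList (List.filter (fun w => decide (w ≠ "")) parts)) = List.intercalate [' '] (List.map String.toList (List.filter (fun w => decide (w ≠ "")) parts)) from rfl]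
    congr 1
    rw [← hmap, List.filter_map]
    congr 1
    apply List.filter_congr
    intro w _
    simp [String.toList_eq_nil_iff]
  -- chain: W l = W t1 = W u, then main_eq
  have hWlt1 : (mySplit l).filter (· ≠ []) = (mySplit t1).filter (· ≠ []) :=
    (W_dropWhile l).symm
  have ht1u : t1 = u ++ (t1.reverse.takeWhile (· = ' ')).reverse := by
    conv_lhs => rw [← List.reverse_reverse t1]
    conv_lhs => rw [← List.takeWhile_append_dropWhile (p := fun c : Char => decide (c = ' ')) (l := t1.reverse)]
    rw [List.reverse_append]
  have hWt1u : (mySplit t1).filter (· ≠ []) = (mySplit u).filter (· ≠ []) := by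
    rw [ht1u]
    exact W_append_spaces _ (fun x hx => by
      simpa using List.mem_takeWhile_imp (List.mem_reverse.mp hx)) u
  have hmain : List.intercalate [' '] ((mySplit u).filter (· ≠ [])) = collapse u :=
    main_eq u.length u le_rfl hune huh hul
  rw [hA, hB, hWlt1, hWt1u, hmain]

-- ===== VERDICT (by name: the statement is the Claim_ definition above) =====
theorem inner_trim_spec : Claim_equal_inner_trim := by
  intro s _ hPre
  unfold Spec_inner_trim
  obtain ⟨c, hc, hp⟩ := List.any_eq_true.mp hPre
  exact inner_trim_eq_alt s ⟨c, hc, of_decide_eq_true hp⟩
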